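-- pv_equiv track=rewrite | github.com/NadezhdaZakharova/325_zakharova_nadezhda | Шифры_1/Table.py | sort_table
-- ===== SOURCE A (Python) =====
-- def sort_table(table):
--     header = table[0]
--     sorted_indices = sorted(range(len(header)), key=lambda i: (header[i], i))
--     sorted_table = []
--     for row in table:
--         sorted_row = ''.join(row[i] for i in sorted_indices)
--         sorted_table.append(sorted_row)
--
--     return sorted_table
-- ===== SOURCE B (Python) =====
-- def sort_table(table):
--     columns = sorted(zip(*table), key=lambda col: col[0])
--     return [''.join(col[r] for col in columns) for r in range(len(table))]
-- ===== Notes on version B (the rewrite author's own statement) =====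
-- stated objective: alternative
-- what changed: B transposes the table with zip(*table), stably sorts whole columns keyed on their header cell, and transposes back, instead of A's building a sorted index list and re-indexing every row.
import Mathlib
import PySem

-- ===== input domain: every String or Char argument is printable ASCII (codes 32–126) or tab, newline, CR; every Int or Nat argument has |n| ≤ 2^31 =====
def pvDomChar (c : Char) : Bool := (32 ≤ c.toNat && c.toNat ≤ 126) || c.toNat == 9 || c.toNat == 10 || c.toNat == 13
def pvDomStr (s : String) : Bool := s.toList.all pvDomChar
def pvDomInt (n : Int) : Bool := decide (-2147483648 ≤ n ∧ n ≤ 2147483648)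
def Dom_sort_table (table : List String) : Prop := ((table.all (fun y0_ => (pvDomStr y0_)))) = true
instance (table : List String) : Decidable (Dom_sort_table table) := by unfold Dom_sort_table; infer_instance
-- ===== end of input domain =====

-- B sorts whole columns (zip-transpose, stable sort keyed on the header cell, transpose back)
-- instead of A's sorted index list; objective: alternative decomposition, same cost.

-- ===== PORT A =====
def sort_table (table : List String) : List String :=
  let header := (PySem.List.pyGet? table 0).getD ""
  let sortedIndices := PySem.List.sorted2 (List.range (PySem.Str.len header).toNat)
      (fun (i : Nat) => (PySem.Str.pyGet? header (i : Int)).getD ' ') (fun i => i)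
  table.foldl (fun acc row =>
    acc ++ [String.ofList (sortedIndices.map (fun (i : Nat) => (PySem.Str.pyGet? row (i : Int)).getD ' '))]) []

-- ===== PORT B =====
-- zip(*rows): variadic zip has no PySem primitive; hand-ported, exact: it yields
-- min-length many tuples, tuple r being the r-th cell of every row.
def pvMinLen : List (List Char) → Nat
  | [] => 0
  | r :: rs => rs.foldl (fun m s => min m s.length) r.length

def pvTranspose : Nat → List (List Char) → List (List Char)
  | 0, _ => []
  | Nat.succ n, rows => rows.map (fun r => r.headD ' ') :: pvTranspose n (rows.map List.tail)

def sort_table_alt (table : List String) : List String :=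
  let rows := table.map String.toList
  let columns := PySem.List.sorted (pvTranspose (pvMinLen rows) rows) (fun c => c.headD ' ')
  (List.range table.length).map (fun r => String.ofList (columns.map (fun c => c.getD r ' ')))

-- ===== PRECONDITION & SPEC =====
-- Pre_ excludes exactly the inputs where A raises IndexError: the empty table
-- (table[0]) and ragged tables with a row shorter than the header (row[i]).
def Pre_sort_table (table : List String) : Prop :=
  table ≠ [] ∧ ∀ row ∈ table, (table.headD "").toList.length ≤ row.toList.length
instance (table : List String) : Decidable (Pre_sort_table table) := by
  unfold Pre_sort_table; infer_instance
def pvWitness_sort_table : List String := ["cba", "123", "xyzw"]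

def Spec_sort_table (table : List String) (out : List String) : Prop := out = sort_table_alt table
instance (table : List String) (out : List String) : Decidable (Spec_sort_table table out) := by unfold Spec_sort_table; infer_instance

-- ===== CLAIM (what is proved, stated in full; the proofs are below) =====
def Claim_equal_sort_table : Prop := ∀ (table : List String), Dom_sort_table table → Pre_sort_table table → Spec_sort_table table (sort_table table)

-- ===== LEMMAS AND PROOFS =====

-- the column of index i
def pvCol (rows : List (List Char)) (i : Nat) : List Char := rows.map (fun r => r.getD i ' ')

lemma headD_eq_getD_zero (r : List Char) : r.headD ' ' = r.getD 0 ' ' := by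
  cases r <;> rfl

lemma tail_getD (r : List Char) (i : Nat) : r.tail.getD i ' ' = r.getD (i + 1) ' ' := by
  cases r <;> rfl

lemma transpose_eq_cols (n : Nat) (rows : List (List Char)) :
    pvTranspose n rows = (List.range n).map (pvCol rows) := by
  induction n generalizing rows with
  | zero => rfl
  | succ n ih =>
      rw [pvTranspose, ih, List.range_succ_eq_map]
      simp only [List.map_cons, List.map_map]
      congr 1
      · simp only [pvCol]
        apply List.map_congr_left
        intro a _
        exact headD_eq_getD_zero a
      · apply List.map_congr_left
        intro i _
        simp only [pvCol, Function.comp, List.map_map]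
        apply List.map_congr_left
        intro a _
        exact tail_getD a i

lemma minLen_eq (hd : List Char) (rest : List (List Char))
    (h : ∀ r ∈ rest, hd.length ≤ r.length) :
    pvMinLen (hd :: rest) = hd.length := by
  show rest.foldl (fun m s => min m s.length) hd.length = hd.length
  induction rest with
  | nil => rfl
  | cons r rs ih =>
      have hr : hd.length ≤ r.length := h r (by simp)
      simp only [List.foldl_cons, min_eq_left hr]
      exact ih (fun r hmem => h r (by simp [hmem]))

lemma insertBy_congr {α : Type} (b1 b2 : α → α → Bool) (x : α) (l : List α)
    (h : ∀ y ∈ l, b1 x y = b2 x y) :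
    PySem.List.insertBy b1 x l = PySem.List.insertBy b2 x l := by
  induction l with
  | nil => rfl
  | cons y ys ih =>
      simp only [PySem.List.insertBy, h y (by simp)]
      split
      · rfl
      · rw [ih (fun z hz => h z (by simp [hz]))]

lemma insertBy_map {α β : Type} (before : β → β → Bool) (g : α → β) (x : α) (l : List α) :
    PySem.List.insertBy before (g x) (l.map g)
      = (PySem.List.insertBy (fun a b => before (g a) (g b)) x l).map g := by
  induction l with
  | nil => rfl
  | cons y ys ih =>
      simp only [List.map_cons, PySem.List.insertBy]
      split
      · rfl
      · simp [ih]

lemma sorted_map_g {α β κ : Type} [LT κ] [DecidableLT κ] (g : α → β) (key : β → κ) (l : List α) :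
    PySem.List.sorted (l.map g) key = (PySem.List.sorted l (fun a => key (g a))).map g := by
  rw [PySem.List.sorted_eq_foldl_insertBy, PySem.List.sorted_eq_foldl_insertBy]
  suffices h : ∀ (l : List α) (acc : List α),
      List.foldl (fun acc x => PySem.List.insertBy (fun a b => decide (key a < key b)) x acc)
          (acc.map g) (l.map g)
        = (List.foldl (fun acc x => PySem.List.insertBy
            (fun a b => decide (key (g a) < key (g b))) x acc) acc l).map g by
    simpa using h l []
  intro l
  induction l with
  | nil => intro acc; rfl
  | cons x xs ih =>
      intro acc
      simp only [List.map_cons, List.foldl_cons]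
      rw [insertBy_map, ih]

lemma foldl_ins_eq (h : Nat → Char) :
    ∀ (l acc : List Nat), (∀ a ∈ acc, ∀ b ∈ l, a < b) → l.Pairwise (· < ·) →
      List.foldl (fun acc x => PySem.List.insertBy (fun a b => decide (h a < h b)) x acc) acc l
        = List.foldl (fun acc x => PySem.List.insertBy
            (fun a b => decide (h a < h b) || (!decide (h b < h a) && decide (a < b))) x acc) acc l := by
  intro l
  induction l with
  | nil => intro acc _ _; rfl
  | cons x xs ih =>
      intro acc hacc hp
      obtain ⟨hx, hp'⟩ := List.pairwise_cons.mp hp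
      simp only [List.foldl_cons]
      have hins : PySem.List.insertBy (fun a b => decide (h a < h b)) x acc
          = PySem.List.insertBy
              (fun a b => decide (h a < h b) || (!decide (h b < h a) && decide (a < b))) x acc := by
        apply insertBy_congr
        intro y hy
        have hyx : y < x := hacc y hy x (by simp)
        have : ¬ (x < y) := by omega
        simp [this]
      rw [← hins]
      apply ih
      · intro a ha b hb
        rcases (PySem.List.mem_insertBy _ _ _ _).mp ha with rfl | ha'
        · exact hx b hb
        · exact hacc a ha' b (by simp [hb])
      · exact hp'

lemma sorted_eq_sorted2_range (n : Nat) (h : Nat → Char) :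
    PySem.List.sorted (List.range n) h = PySem.List.sorted2 (List.range n) h (fun i => i) := by
  rw [PySem.List.sorted_eq_foldl_insertBy]
  show _ = List.foldl (fun acc x => PySem.List.insertBy
      (fun a b => decide (h a < h b) || (!decide (h b < h a) && decide (a < b))) x acc) [] (List.range n)
  exact foldl_ins_eq h (List.range n) [] (by simp) List.pairwise_lt_range

lemma getD_map_lt {α β : Type} (f : α → β) (l : List α) (r : Nat) (d : β) (h : r < l.length) :
    (l.map f).getD r d = f l[r] := by
  simp [List.getD_eq_getElem?_getD, List.getElem?_map, List.getElem?_eq_getElem h]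

lemma main_eq (table : List String) (hpre : Pre_sort_table table) :
    sort_table table = sort_table_alt table := by
  obtain ⟨hne, hlen⟩ := hpre
  obtain ⟨hd, rest, rfl⟩ := List.exists_cons_of_ne_nil hne
  have hlen' : ∀ row ∈ hd :: rest, hd.toList.length ≤ row.toList.length := by
    simpa using hlen
  -- shared names
  set hl := hd.toList with hhl
  set n := hl.length with hn
  set idxs := PySem.List.sorted2 (List.range n) (fun i => hl.getD i ' ') (fun i => i) with hidxs
  set rows := (hd :: rest).map String.toList with hrows
  -- A side
  have hA : sort_table (hd :: rest)
      = (hd :: rest).map (fun row => String.ofList (idxs.map (fun i => row.toList.getD i ' '))) := by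
    show List.foldl _ [] (hd :: rest) = _
    rw [PySem.List.foldl_append_singleton_eq_map]
    simp only [List.nil_append]
    have hhdr : (PySem.List.pyGet? (hd :: rest) 0).getD "" = hd := by
      rw [PySem.List.pyGet?_zero_cons]; rfl
    rw [hhdr]
    have hlenn : (PySem.Str.len hd).toNat = n := by
      rw [PySem.Str.len_eq]; simp [hn, hhl]
    rw [hlenn]
    have hkey : (fun (i : Nat) => (PySem.Str.pyGet? hd (i : Int)).getD ' ')
        = (fun i => hl.getD i ' ') := by
      funext i
      rw [PySem.Str.pyGet?_natCast, hhl, List.getD_eq_getElem?_getD]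
    rw [hkey]
    apply List.map_congr_left
    intro row _
    congr 1
    apply List.map_congr_left
    intro i _
    rw [PySem.Str.pyGet?_natCast, List.getD_eq_getElem?_getD]
  -- B side
  have hmin : pvMinLen rows = n := by
    rw [hrows, List.map_cons]
    apply minLen_eq
    intro r hr
    obtain ⟨row, hrow, rfl⟩ := List.mem_map.mp hr
    exact hlen' row (by simp [hrow])
  have hcolhead : ∀ i, (pvCol rows i).headD ' ' = hl.getD i ' ' := by
    intro i
    rw [hrows, List.map_cons]
    rfl
  have hB : sort_table_alt (hd :: rest)
      = (List.range (hd :: rest).length).map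
          (fun r => String.ofList (idxs.map (fun i => (pvCol rows i).getD r ' '))) := by
    show (List.range (hd :: rest).length).map _ = _
    rw [hmin, transpose_eq_cols, sorted_map_g]
    have : (fun (a : Nat) => (pvCol rows a).headD ' ') = (fun i => hl.getD i ' ') := funext hcolhead
    rw [this, sorted_eq_sorted2_range, ← hidxs]
    apply List.map_congr_left
    intro r _
    simp only [List.map_map]
    rfl
  -- combine
  rw [hA, hB]
  apply List.ext_getElem
  · simp
  · intro r h1 h2
    have hr : r < rest.length + 1 := by simpa using h1
    simp only [List.getElem_map, List.getElem_range]
    congr 1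
    apply List.map_congr_left
    intro i _
    have hrows_len : r < rows.length := by
      rw [hrows]; simpa using hr
    rw [pvCol, getD_map_lt _ rows r ' ' hrows_len]
    simp only [hrows, List.getElem_map]

-- ===== VERDICT (by name: the statement is the Claim_ definition above) =====
theorem sort_table_spec : Claim_equal_sort_table := by
  intro table _ hpre
  show sort_table table = sort_table_alt table
  exact main_eq table hpre
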